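-- pv_equiv track=rewrite | github.com/Enigmatisms/Ethians-Alpha-1.1 | equipment/equipfunc.py | getPosInfo
-- ===== SOURCE A (Python) =====
-- def getPosInfo(bag, page):          #给ezgui提供每个装备信息的放置位置
--     num=len(bag)-page*16
--     lst=[]
--     if num<=8:
--         for i in range(num):      #第一纵列
--             pos1=(110, 160, 146+i*54)
--             lst.append(pos1)
--     elif num>8 and num<=16:
--         for i in range(8):      #第一纵列
--             pos1=(110, 160, 146+i*54)
--             lst.append(pos1)
--         for i in range(8, num):      #第二纵列
--             pos1=(660, 710, 94+(i-8)*54)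
--             lst.append(pos1)
--     elif num>16:
--         for i in range(8):      #第一纵列
--             pos1=(110, 160, 146+i*54)
--             lst.append(pos1)
--         for i in range(8, 16):      #第二纵列
--             pos1=(660, 710, 94+(i-8)*54)
--             lst.append(pos1)
--     return lst
-- ===== SOURCE B (Python) =====
-- # All 16 icon positions on a full page are fixed; keep them as a constant table
-- # and slice off the first `n` for the current page (slicing caps at 16 for free).
-- _PAGE_POSITIONS = [
--     (110, 160, 146), (110, 160, 200), (110, 160, 254), (110, 160, 308),
--     (110, 160, 362), (110, 160, 416), (110, 160, 470), (110, 160, 524),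
--     (660, 710, 94), (660, 710, 148), (660, 710, 202), (660, 710, 256),
--     (660, 710, 310), (660, 710, 364), (660, 710, 418), (660, 710, 472),
-- ]
--
-- def getPosInfo(bag, page):
--     n = len(bag) - page * 16
--     return _PAGE_POSITIONS[:n] if n > 0 else []
-- ===== Notes on version B (the rewrite author's own statement) =====
-- stated objective: simpler
-- what changed: Replaces A's three-way case split with duplicated coordinate-generating loops by a precomputed literal table of the 16 page positions, returning a slice of that table (no coordinate arithmetic or loops at call time).
import Mathlib
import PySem

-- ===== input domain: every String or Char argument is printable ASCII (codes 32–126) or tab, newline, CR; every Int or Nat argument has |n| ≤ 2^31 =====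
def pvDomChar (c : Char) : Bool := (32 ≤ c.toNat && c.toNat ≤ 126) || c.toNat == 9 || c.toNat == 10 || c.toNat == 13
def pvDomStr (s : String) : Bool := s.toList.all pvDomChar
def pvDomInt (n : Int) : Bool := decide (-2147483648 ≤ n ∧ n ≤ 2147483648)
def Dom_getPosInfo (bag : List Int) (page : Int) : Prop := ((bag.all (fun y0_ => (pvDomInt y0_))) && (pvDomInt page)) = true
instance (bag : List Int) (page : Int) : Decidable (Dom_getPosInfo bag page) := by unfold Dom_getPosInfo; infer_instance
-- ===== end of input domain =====

-- B replaces A's three-way case split with duplicated coordinate loops by a precomputed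
-- literal table of the 16 page positions, returning a slice of it; objective: simpler.

-- ===== PORT A =====
def getPosInfo (bag : List Int) (page : Int) : List (Int × Int × Int) :=
  let num : Int := (bag.length : Int) - page * 16
  if num ≤ 8 then
    (PySem.List.pyRange 0 num 1).foldl (fun lst i => lst ++ [(110, 160, 146 + i * 54)]) []
  else if 8 < num ∧ num ≤ 16 then
    let lst := (PySem.List.pyRange 0 8 1).foldl (fun lst i => lst ++ [(110, 160, 146 + i * 54)]) []
    (PySem.List.pyRange 8 num 1).foldl (fun lst i => lst ++ [(660, 710, 94 + (i - 8) * 54)]) lst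
  else
    let lst := (PySem.List.pyRange 0 8 1).foldl (fun lst i => lst ++ [(110, 160, 146 + i * 54)]) []
    (PySem.List.pyRange 8 16 1).foldl (fun lst i => lst ++ [(660, 710, 94 + (i - 8) * 54)]) lst

-- ===== PORT B =====
-- the constant table _PAGE_POSITIONS of Source B
def pagePositions : List (Int × Int × Int) :=
  [(110, 160, 146), (110, 160, 200), (110, 160, 254), (110, 160, 308),
   (110, 160, 362), (110, 160, 416), (110, 160, 470), (110, 160, 524),
   (660, 710, 94), (660, 710, 148), (660, 710, 202), (660, 710, 256),
   (660, 710, 310), (660, 710, 364), (660, 710, 418), (660, 710, 472)]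

def getPosInfo_alt (bag : List Int) (page : Int) : List (Int × Int × Int) :=
  let n : Int := (bag.length : Int) - page * 16
  if 0 < n then PySem.List.slice pagePositions none (some n) else []

-- ===== PRECONDITION & SPEC =====
def Spec_getPosInfo (bag : List Int) (page : Int) (out : List (Int × Int × Int)) : Prop := out = getPosInfo_alt bag page
instance (bag : List Int) (page : Int) (out : List (Int × Int × Int)) : Decidable (Spec_getPosInfo bag page out) := by unfold Spec_getPosInfo; infer_instance

-- ===== CLAIM =====
def Claim_equal_getPosInfo : Prop := ∀ (bag : List Int) (page : Int), Dom_getPosInfo bag page → Spec_getPosInfo bag page (getPosInfo bag page)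

-- ===== LEMMAS AND PROOFS =====

-- both ports depend on the input only through num = len(bag) - page*16
theorem key (num : Int) :
    (if num ≤ 8 then
      (PySem.List.pyRange 0 num 1).foldl (fun lst i => lst ++ [((110:Int), (160:Int), 146 + i * 54)]) []
    else if 8 < num ∧ num ≤ 16 then
      let lst := (PySem.List.pyRange 0 8 1).foldl (fun lst i => lst ++ [((110:Int), (160:Int), 146 + i * 54)]) []
      (PySem.List.pyRange 8 num 1).foldl (fun lst i => lst ++ [(660, 710, 94 + (i - 8) * 54)]) lst
    else
      let lst := (PySem.List.pyRange 0 8 1).foldl (fun lst i => lst ++ [((110:Int), (160:Int), 146 + i * 54)]) []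
      (PySem.List.pyRange 8 16 1).foldl (fun lst i => lst ++ [(660, 710, 94 + (i - 8) * 54)]) lst)
    = (if 0 < num then PySem.List.slice pagePositions none (some num) else []) := by
  by_cases h0 : num ≤ 0
  · rw [if_pos (by omega : num ≤ 8), PySem.List.pyRange_one_eq_nil (by omega), if_neg (by omega)]
    decide
  · by_cases h16 : num ≤ 16
    · rw [if_pos (by omega : 0 < num)]
      interval_cases num <;> decide
    · rw [if_neg (by omega), if_neg (by omega), if_pos (by omega),
        PySem.List.slice_to _ (by omega),
        List.take_of_length_le (by simp [pagePositions]; omega)]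
      decide

theorem getPosInfo_spec : Claim_equal_getPosInfo := by
  intro bag page _
  show getPosInfo bag page = getPosInfo_alt bag page
  simpa only [getPosInfo, getPosInfo_alt] using key ((bag.length : Int) - page * 16)
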